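-- pv_equiv track=rewrite | github.com/m13v/social-autoposter | scripts/scan_dm_candidates.py | infer_target_project
-- ===== SOURCE A (Python) =====
-- def infer_target_project(text_parts, project_topic_index):
--     """Return the project whose topics overlap most with the given text, or None."""
--     blob = " ".join(t for t in text_parts if t).lower()
--     if not blob:
--         return None
--     best_name, best_score = None, 0
--     for name, phrases in project_topic_index:
--         score = 0
--         for phrase in phrases:
--             if not phrase:
--                 continue
--             if " " in phrase:
--                 if phrase in blob:
--                     score += 2
--             else:
--                 if f" {phrase} " in f" {blob} ":
--                     score += 1
--         if score > best_score:
--             best_score = score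
--             best_name = name
--     return best_name if best_score > 0 else None
-- ===== SOURCE B (Python) =====
-- def infer_target_project(text_parts, project_topic_index):
--     """Phrase-centric rewrite: evaluate each distinct phrase once against the text,
--     then distribute its weight to the listing projects via an inverted index."""
--     blob = " ".join(t for t in text_parts if t).lower()
--     if not blob:
--         return None
--     words = set(blob.split(" "))
--     occ = {}  # phrase -> indices of the projects listing it (with multiplicity)
--     for i, (_name, phrases) in enumerate(project_topic_index):
--         for p in phrases:
--             if p:
--                 occ.setdefault(p, []).append(i)
--     scores = {}  # project index -> accumulated score
--     for p, idxs in occ.items():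
--         if " " in p:
--             v = 2 if p in blob else 0
--         else:
--             v = 1 if p in words else 0
--         if v:
--             for i in idxs:
--                 scores[i] = scores.get(i, 0) + v
--     best_name, best = None, 0
--     for i, (name, _phrases) in enumerate(project_topic_index):
--         s = scores.get(i, 0)
--         if best < s:
--             best_name, best = name, s
--     return best_name if best > 0 else None
-- ===== Notes on version B (the rewrite author's own statement) =====
-- stated objective: faster
-- what changed: B inverts the loop structure: instead of scanning every phrase of every project against the blob, it tokenizes the blob once into a word set, builds an inverted index phrase->project indices, evaluates each DISTINCT phrase once (hash lookup for single words, one substring scan for multi-word phrases), and distributes the weights to per-project score counters before a final first-strict-max scan.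
import Mathlib
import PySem

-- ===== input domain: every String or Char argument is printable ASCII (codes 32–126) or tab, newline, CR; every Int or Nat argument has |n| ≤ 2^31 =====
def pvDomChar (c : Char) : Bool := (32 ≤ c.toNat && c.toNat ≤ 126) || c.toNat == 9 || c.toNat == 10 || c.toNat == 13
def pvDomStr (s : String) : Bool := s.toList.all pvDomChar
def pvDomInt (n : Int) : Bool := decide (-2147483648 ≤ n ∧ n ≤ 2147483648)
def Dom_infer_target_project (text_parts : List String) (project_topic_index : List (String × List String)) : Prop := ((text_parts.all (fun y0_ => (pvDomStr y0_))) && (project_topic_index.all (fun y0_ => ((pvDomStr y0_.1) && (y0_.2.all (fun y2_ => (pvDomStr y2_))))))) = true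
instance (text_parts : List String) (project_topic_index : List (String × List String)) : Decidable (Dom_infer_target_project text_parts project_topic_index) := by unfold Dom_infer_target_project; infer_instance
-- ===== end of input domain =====

-- B inverts A's loop structure: it tokenizes the blob once into a word set, builds an
-- inverted index phrase -> project indices, evaluates each distinct phrase once and
-- distributes its weight to per-project score counters, then scans for the first strict
-- maximum; same return value for every input.

-- ===== PORT A =====
def infer_target_project (text_parts : List String) (project_topic_index : List (String × List String)) : Option String :=
  let blob := PySem.Chars.lower (PySem.Chars.join [' '] ((text_parts.filter (fun t => t ≠ "")).map String.toList))
  if blob = [] then none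
  else
    let best := project_topic_index.foldl (fun (st : Option String × Int) np =>
      let score := np.2.foldl (fun (sc : Int) phrase =>
        let pl := phrase.toList
        if pl = [] then sc
        else if PySem.Chars.isIn [' '] pl then
          (if PySem.Chars.isIn pl blob then sc + 2 else sc)
        else
          (if PySem.Chars.isIn (' ' :: pl ++ [' ']) (' ' :: blob ++ [' ']) then sc + 1 else sc)) 0
      if st.2 < score then (some np.1, score) else st) (none, 0)
    if 0 < best.2 then best.1 else none

-- ===== PORT B =====
def infer_target_project_alt (text_parts : List String) (project_topic_index : List (String × List String)) : Option String :=
  let blob := PySem.Chars.lower (PySem.Chars.join [' '] ((text_parts.filter (fun t => t ≠ "")).map String.toList))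
  if blob = [] then none
  else
    let words : PySem.Set (List Char) := PySem.Set.ofList (PySem.Chars.splitOn blob [' '])
    -- occ: phrase -> indices of the projects listing it (setdefault(p, []).append(i))
    let occ : PySem.Dict (List Char) (List Int) :=
      (PySem.List.enumerate project_topic_index 0).foldl (fun d inp =>
        inp.2.2.foldl (fun d p =>
          if p = "" then d else d.modify p.toList [] (· ++ [inp.1])) d) PySem.Dict.empty
    -- scores: project index -> accumulated score  (scores[i] = scores.get(i, 0) + v)
    let scores : PySem.Dict Int Int :=
      occ.items.foldl (fun s pv =>
        let v : Int := if PySem.Chars.isIn [' '] pv.1 then (if PySem.Chars.isIn pv.1 blob then 2 else 0)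
                       else (if PySem.Set.contains words pv.1 then 1 else 0)
        if v ≠ 0 then pv.2.foldl (fun s i => s.modify i 0 (· + v)) s else s) PySem.Dict.empty
    let fin := (PySem.List.enumerate project_topic_index 0).foldl (fun (st : Option String × Int) inp =>
        let s := scores.getD inp.1 0
        if st.2 < s then (some inp.2.1, s) else st) (none, 0)
    if 0 < fin.2 then fin.1 else none

-- ===== PRECONDITION & SPEC =====
def Spec_infer_target_project (text_parts : List String) (project_topic_index : List (String × List String)) (out : Option String) : Prop := out = infer_target_project_alt text_parts project_topic_index
instance (text_parts : List String) (project_topic_index : List (String × List String)) (out : Option String) : Decidable (Spec_infer_target_project text_parts project_topic_index out) := by unfold Spec_infer_target_project; infer_instance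

-- ===== CLAIM (what is proved, stated in full; the proofs are below) =====
def Claim_equal_infer_target_project : Prop := ∀ (text_parts : List String) (project_topic_index : List (String × List String)), Dom_infer_target_project text_parts project_topic_index → Spec_infer_target_project text_parts project_topic_index (infer_target_project text_parts project_topic_index)

-- ===== LEMMAS AND PROOFS =====

def pvSplitSp : List Char → List (List Char)
  | [] => [[]]
  | c :: t =>
    if c = ' ' then [] :: pvSplitSp t
    else
      match pvSplitSp t with
      | [] => [[c]]
      | h :: r => (c :: h) :: r

theorem pvSplitSp_ne_nil (s : List Char) : pvSplitSp s ≠ [] := by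
  cases s with
  | nil => simp [pvSplitSp]
  | cons c t =>
    simp only [pvSplitSp]
    split_ifs
    · simp
    · cases h : pvSplitSp t <;> simp

theorem pvSplitSp_go (fuel : Nat) (l cur : List Char) (acc : List (List Char))
    (h : l.length < fuel) :
    PySem.Chars.splitOn.go [' '] fuel l cur acc
      = acc.reverse ++ (pvSplitSp l).modifyHead (cur.reverse ++ ·) := by
  induction fuel generalizing l cur acc with
  | zero => omega
  | succ f ih =>
    cases l with
    | nil =>
      rw [PySem.Chars.splitOn.go.eq_def]
      simp [pvSplitSp]
    | cons c rest =>
      rw [PySem.Chars.splitOn.go.eq_def]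
      simp only []
      by_cases hc : c = ' '
      · subst hc
        have hpre : List.isPrefixOf [' '] (' ' :: rest) = true := by simp [List.isPrefixOf]
        simp only [hpre]
        have hdrop : List.drop [' '].length (' ' :: rest) = rest := rfl
        rw [hdrop, ih rest [] _ (by simp at h; omega)]
        simp [pvSplitSp]
        generalize pvSplitSp rest = L
        cases L <;> rfl
      · have hpre : List.isPrefixOf [' '] (c :: rest) = false := by
          simp [List.isPrefixOf]; exact fun hh => absurd hh.symm hc
        simp only [hpre]
        rw [ih rest (c :: cur) acc (by simp at h ⊢; omega)]
        simp only [pvSplitSp, if_neg hc]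
        cases hrec : pvSplitSp rest with
        | nil => exact absurd hrec (pvSplitSp_ne_nil rest)
        | cons hh rr => simp

theorem splitOn_eq_pvSplitSp (s : List Char) :
    PySem.Chars.splitOn s [' '] = pvSplitSp s := by
  unfold PySem.Chars.splitOn
  rw [pvSplitSp_go _ _ _ _ (by omega)]
  cases h : pvSplitSp s with
  | nil => exact absurd h (pvSplitSp_ne_nil s)
  | cons hh rr => simp

theorem pvSplitSp_head? (s : List Char) :
    (pvSplitSp s).head? = some (s.takeWhile (fun c => c != ' ')) := by
  induction s with
  | nil => rfl
  | cons c t ih =>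
    by_cases hc : c = ' '
    · subst hc; simp [pvSplitSp, List.takeWhile]
    · simp only [pvSplitSp, if_neg hc]
      cases ht : pvSplitSp t with
      | nil => exact absurd ht (pvSplitSp_ne_nil t)
      | cons h r =>
        rw [ht] at ih
        simp at ih
        have hct : (c != ' ') = true := by simpa using hc
        simp [List.takeWhile, hct, ← ih]

theorem takeWhile_char (p s : List Char) (hsp : ' ' ∉ p) :
    p = s.takeWhile (fun c => c != ' ') ↔ (p = s ∨ p ++ [' '] <+: s) := by
  induction s generalizing p with
  | nil =>
    simp only [List.takeWhile_nil]
    constructor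
    · rintro rfl; left; rfl
    · rintro (rfl | hpre)
      · rfl
      · simp at hpre
  | cons c t ih =>
    by_cases hc : c = ' '
    · subst hc
      simp only [List.takeWhile, show ((' ' : Char) != ' ') = false from rfl]
      constructor
      · rintro rfl
        right; simp
      · rintro (rfl | hpre)
        · exact absurd (List.mem_cons_self) hsp
        · cases p with
          | nil => rfl
          | cons q p' =>
            rw [List.cons_append] at hpre
            rw [List.cons_prefix_cons] at hpre
            exact absurd hpre.1.symm (fun hq => hsp (hq ▸ List.mem_cons_self))
    · simp only [List.takeWhile, show ((c != ' ') = true) from by simpa using hc]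
      cases p with
      | nil =>
        constructor
        · intro hh; exact absurd hh (by simp)
        · rintro (hh | hpre)
          · exact absurd hh.symm (List.cons_ne_nil _ _)
          · simp only [List.nil_append] at hpre
            rw [List.cons_prefix_cons] at hpre
            exact absurd hpre.1.symm hc
      | cons q p' =>
        have hsp' : ' ' ∉ p' := fun hm => hsp (List.mem_cons_of_mem _ hm)
        constructor
        · intro hh
          rw [List.cons.injEq] at hh
          rcases hh with ⟨rfl, hh⟩
          rcases (ih p' hsp').mp hh with rfl | hpre
          · left; rfl
          · right; rw [List.cons_append, List.cons_prefix_cons]; exact ⟨rfl, hpre⟩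
        · rintro (hh | hpre)
          · rw [List.cons.injEq] at hh
            rcases hh with ⟨rfl, rfl⟩
            rw [List.cons.injEq]
            exact ⟨rfl, (ih p' hsp').mpr (Or.inl rfl)⟩
          · rw [List.cons_append, List.cons_prefix_cons] at hpre
            rcases hpre with ⟨rfl, hpre⟩
            rw [List.cons.injEq]
            exact ⟨rfl, (ih p' hsp').mpr (Or.inr hpre)⟩

theorem infix_tail (p s : List Char) (hsp : ' ' ∉ p) :
    ((' ' :: (p ++ [' '])) <:+: (s ++ [' '])) ↔ p ∈ (pvSplitSp s).tail := by
  induction s with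
  | nil =>
    simp only [List.nil_append]
    constructor
    · intro h
      have := h.length_le
      simp at this
    · intro h; simp [pvSplitSp] at h
  | cons c t ih =>
    rw [List.cons_append, List.infix_cons_iff]
    by_cases hc : c = ' '
    · subst hc
      have hpre : ((' ' :: (p ++ [' '])) <+: (' ' :: (t ++ [' ']))) ↔ (p = t ∨ p ++ [' '] <+: t) := by
        rw [List.cons_prefix_cons]
        simp only [true_and]
        exact List.prefix_concat_iff.trans (by
          constructor
          · rintro (hh | hh)
            · left; simpa using hh
            · right; exact hh
          · rintro (rfl | hh)
            · left; rfl
            · right; exact hh)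
      rw [hpre, ih]
      have htail : (pvSplitSp (' ' :: t)).tail = pvSplitSp t := by simp [pvSplitSp]
      rw [htail, ← takeWhile_char p t hsp]
      cases ht : pvSplitSp t with
      | nil => exact absurd ht (pvSplitSp_ne_nil t)
      | cons h r =>
        have hh : h = t.takeWhile (fun c => c != ' ') := by
          have := pvSplitSp_head? t
          rw [ht] at this; simpa using this
        rw [← hh]
        simp
    · have hnpre : ¬ ((' ' :: (p ++ [' '])) <+: (c :: (t ++ [' ']))) := by
        rw [List.cons_prefix_cons]
        rintro ⟨hh, -⟩
        exact hc hh.symm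
      simp only [hnpre, false_or]
      rw [ih]
      simp only [pvSplitSp, if_neg hc]
      cases ht : pvSplitSp t with
      | nil => exact absurd ht (pvSplitSp_ne_nil t)
      | cons h r => simp

theorem token_mem (p s : List Char) (_hp : p ≠ []) (hsp : ' ' ∉ p) :
    (PySem.Chars.isIn (' ' :: p ++ [' ']) (' ' :: s ++ [' ']) = true) ↔ p ∈ pvSplitSp s := by
  rw [PySem.Chars.isIn_iff_infix]
  have h1 : (' ' :: s ++ [' ']) = ((' ' :: s) ++ [' ']) := by simp
  have h2 : (' ' :: p ++ [' ']) = (' ' :: (p ++ [' '])) := by simp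
  rw [h1, h2, infix_tail p (' ' :: s) hsp]
  simp [pvSplitSp]

/-- A's per-phrase score in word-set form (proof helper). -/
def gScore (blob : List Char) (phrase : String) : Int :=
  let pl := phrase.toList
  if PySem.Chars.isIn [' '] pl && PySem.Chars.isIn pl blob then (2 : Int)
  else if (!pl.isEmpty) && (!PySem.Chars.isIn [' '] pl)
      && PySem.Set.contains (PySem.Set.ofList (PySem.Chars.splitOn blob [' '])) pl then 1
  else 0

/-- B's per-distinct-phrase value (proof helper). -/
def pvVal (blob : List Char) (p : List Char) : Int :=
  if PySem.Chars.isIn [' '] p then (if PySem.Chars.isIn p blob then 2 else 0)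
  else (if PySem.Set.contains (PySem.Set.ofList (PySem.Chars.splitOn blob [' '])) p then 1 else 0)

theorem pvVal_eq_gScore (blob : List Char) (p : String) (hp : p ≠ "") :
    pvVal blob p.toList = gScore blob p := by
  have hne : p.toList ≠ [] := by simp [String.toList_eq_nil_iff, hp]
  unfold pvVal gScore
  by_cases h1 : PySem.Chars.isIn [' '] p.toList
  · simp only [h1, Bool.true_and, Bool.not_true, Bool.and_false, Bool.false_and]
    by_cases h2 : PySem.Chars.isIn p.toList blob <;> simp [h2]
  · have h1' : PySem.Chars.isIn [' '] p.toList = false := by simpa using h1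
    simp [h1', show (!p.toList.isEmpty) = true from by simpa using hne]

theorem gScore_empty (blob : List Char) : gScore blob "" = 0 := by
  simp [gScore, show PySem.Chars.isIn [' '] [] = false from rfl]

theorem score_eq (blob : List Char) (phrases : List String) :
    phrases.foldl (fun (sc : Int) phrase =>
        let pl := phrase.toList
        if pl = [] then sc
        else if PySem.Chars.isIn [' '] pl then
          (if PySem.Chars.isIn pl blob then sc + 2 else sc)
        else
          (if PySem.Chars.isIn (' ' :: pl ++ [' ']) (' ' :: blob ++ [' ']) then sc + 1 else sc)) 0
      = (phrases.map (gScore blob)).sum := by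
  have hstep : (fun (sc : Int) (phrase : String) =>
        let pl := phrase.toList
        if pl = [] then sc
        else if PySem.Chars.isIn [' '] pl then
          (if PySem.Chars.isIn pl blob then sc + 2 else sc)
        else
          (if PySem.Chars.isIn (' ' :: pl ++ [' ']) (' ' :: blob ++ [' ']) then sc + 1 else sc))
      = (fun (sc : Int) (phrase : String) => sc + gScore blob phrase) := by
    funext sc phrase
    simp only [gScore]
    by_cases h0 : phrase.toList = []
    · rw [if_pos h0, h0]
      norm_num [show PySem.Chars.isIn [' '] [] = false from rfl]
    · rw [if_neg h0]
      by_cases h1 : PySem.Chars.isIn [' '] phrase.toList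
      · simp only [h1, Bool.true_and, Bool.not_true, Bool.false_and, Bool.and_false]
        by_cases h2 : PySem.Chars.isIn phrase.toList blob <;> simp [h2]
      · have hb1 : PySem.Chars.isIn [' '] phrase.toList = false := by
          simpa using h1
        have hsp : ' ' ∉ phrase.toList := by
          intro hm
          exact (PySem.Chars.isIn_eq_false_iff _ _ |>.mp hb1)
            ((List.singleton_infix_iff _ _).mpr hm)
        have hmem : PySem.Chars.isIn (' ' :: phrase.toList ++ [' ']) (' ' :: blob ++ [' '])
            = PySem.Set.contains (PySem.Set.ofList (PySem.Chars.splitOn blob [' '])) phrase.toList := by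
          rw [splitOn_eq_pvSplitSp, Bool.eq_iff_iff]
          have h4 : PySem.Set.contains (PySem.Set.ofList (pvSplitSp blob)) phrase.toList = true
              ↔ phrase.toList ∈ pvSplitSp blob := by
            simp only [PySem.Set.contains, List.contains_iff_mem]
            exact PySem.Set.mem_ofList _ _
          rw [h4, token_mem _ _ h0 hsp]
        simp only [hb1, Bool.false_and, Bool.not_false, Bool.true_and,
          show (!phrase.toList.isEmpty) = true from by simpa using h0, hmem]
        by_cases h3 : phrase.toList ∈ PySem.Chars.splitOn blob [' '] <;> simp [h3]
  rw [hstep, PySem.List.foldl_add (g := gScore blob)]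
  simp


/-- Flat (phrase, project-index) pairs of the inverted-index build (proof helper). -/
def pvPairs (pti : List (String × List String)) (s : Int) : List (List Char × Int) :=
  (PySem.List.enumerate pti s).flatMap (fun inp => (inp.2.2.filter (fun p => p ≠ "")).map (fun p => (p.toList, inp.1)))

/-- A project's total score (proof helper). -/
def pvGsum (blob : List Char) (np : String × List String) : Int := (np.2.map (gScore blob)).sum

theorem pvPairs_cons (x : String × List String) (t : List (String × List String)) (s : Int) :
    pvPairs (x :: t) s = ((x.2.filter (fun p => p ≠ "")).map (fun p => (p.toList, s))) ++ pvPairs t (s + 1) := by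
  simp [pvPairs, PySem.List.enumerate_cons]

theorem pvPairs_idx_ge (pti : List (String × List String)) (s : Int) :
    ∀ pr ∈ pvPairs pti s, s ≤ pr.2 := by
  induction pti generalizing s with
  | nil => simp [pvPairs, PySem.List.enumerate_nil]
  | cons x t ih =>
    intro pr hpr
    rw [pvPairs_cons] at hpr
    rcases List.mem_append.mp hpr with h | h
    · rcases List.mem_map.mp h with ⟨p, -, rfl⟩; simp
    · have := ih (s + 1) pr h; omega

theorem pvScoresGet (idxs : List Int) (s : PySem.Dict Int Int) (v j : Int) :
    ((idxs.foldl (fun s i => s.modify i 0 (· + v)) s).getD j 0) = s.getD j 0 + v * idxs.count j := by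
  induction idxs generalizing s with
  | nil => simp
  | cons i t ih =>
    rw [List.foldl_cons, ih, PySem.Dict.getD_modify, List.count_cons]
    by_cases h : j = i
    · subst h; simp; ring
    · have hb : (i == j) = false := by simp [Ne.symm h]
      simp [h, hb]

theorem pvScoresFold (blob : List Char) (L : List (List Char × List Int)) (s : PySem.Dict Int Int) (j : Int) :
    ((L.foldl (fun s pv =>
        if pvVal blob pv.1 ≠ 0 then pv.2.foldl (fun s i => s.modify i 0 (· + pvVal blob pv.1)) s else s) s).getD j 0)
      = s.getD j 0 + (L.map (fun pv => pvVal blob pv.1 * pv.2.count j)).sum := by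
  induction L generalizing s with
  | nil => simp
  | cons pv t ih =>
    rw [List.foldl_cons, List.map_cons, List.sum_cons]
    by_cases h : pvVal blob pv.1 ≠ 0
    · rw [if_pos h, ih, pvScoresGet]; ring
    · rw [if_neg h]
      rw [not_not] at h
      rw [ih, h]; ring

theorem pvInnerFold (ph : List String) (d : PySem.Dict (List Char) (List Int)) (i : Int) :
    ph.foldl (fun d p => if p = "" then d else d.modify p.toList [] (· ++ [i])) d
      = ((ph.filter (fun p => p ≠ "")).map (fun p => (p.toList, i))).foldl
          (fun d pr => d.modify pr.1 [] (· ++ [pr.2])) d := by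
  induction ph generalizing d with
  | nil => rfl
  | cons p t ih =>
    by_cases h : p = ""
    · simp [h, ih]
    · simp [h, ih]

theorem pvOccEq (pti : List (String × List String)) (s : Int) (d : PySem.Dict (List Char) (List Int)) :
    (PySem.List.enumerate pti s).foldl (fun d inp =>
        inp.2.2.foldl (fun d p => if p = "" then d else d.modify p.toList [] (· ++ [inp.1])) d) d
      = (pvPairs pti s).foldl (fun d pr => d.modify pr.1 [] (· ++ [pr.2])) d := by
  rw [pvPairs, List.foldl_flatMap]
  exact (PySem.List.foldl_congr_mem _ _ _ _ (fun d inp _ => pvInnerFold inp.2.2 d inp.1))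

theorem pvSumSplit {α : Type} (l : List α) (q : α → Bool) (g : α → Int) :
    (l.map g).sum = ((l.filter q).map g).sum + ((l.filter (fun x => !q x)).map g).sum := by
  induction l with
  | nil => simp
  | cons x t ih =>
    by_cases h : q x <;> simp [h, ih] <;> ring

theorem pvSumIteConst {α : Type} (l : List α) (p : α → Prop) [DecidablePred p] (c : Int) :
    (l.map (fun x => if p x then c else 0)).sum = c * (l.countP (fun x => decide (p x))) := by
  induction l with
  | nil => simp
  | cons x t ih =>
    by_cases h : p x <;> simp [h, ih] <;> ring

theorem pvGroup (blob : List Char) (K : List (List Char)) (l : List (List Char × Int)) (j : Int)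
    (hK : K.Nodup) (hl : ∀ pr ∈ l, pr.1 ∈ K) :
    (K.map (fun k => pvVal blob k * (((l.filter (fun pr => pr.1 == k)).map (fun pr => pr.2)).count j))).sum
      = (l.map (fun pr => if pr.2 = j then pvVal blob pr.1 else 0)).sum := by
  induction K generalizing l with
  | nil =>
    cases l with
    | nil => rfl
    | cons pr t => exact absurd (hl pr List.mem_cons_self) (by simp)
  | cons k K' ih =>
    rw [List.map_cons, List.sum_cons,
      pvSumSplit l (fun pr => pr.1 == k) (fun pr => if pr.2 = j then pvVal blob pr.1 else 0)]
    have hKn : K'.Nodup := hK.of_cons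
    have hknot : k ∉ K' := (List.nodup_cons.mp hK).1
    -- head group
    have hhead : pvVal blob k * ((((l.filter (fun pr => pr.1 == k)).map (fun pr => pr.2)).count j : Nat) : Int)
        = ((l.filter (fun pr => pr.1 == k)).map (fun pr => if pr.2 = j then pvVal blob pr.1 else 0)).sum := by
      have h1 : (l.filter (fun pr => pr.1 == k)).map (fun pr => if pr.2 = j then pvVal blob pr.1 else 0)
          = (l.filter (fun pr => pr.1 == k)).map (fun pr => if pr.2 = j then pvVal blob k else 0) := by
        apply List.map_congr_left
        intro pr hpr
        have : pr.1 = k := by simpa using (List.mem_filter.mp hpr).2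
        rw [this]
      rw [h1, pvSumIteConst]
      congr 1
      rw [List.count, List.countP_map]
      exact congrArg _ (List.countP_congr (fun pr _ => by simp [Function.comp_apply]))
    -- tail groups: restrict l to the pairs not keyed k
    have htail : (K'.map (fun k' => pvVal blob k' * (((l.filter (fun pr => pr.1 == k')).map (fun pr => pr.2)).count j))).sum
        = (((l.filter (fun pr => !(pr.1 == k))).map (fun pr => if pr.2 = j then pvVal blob pr.1 else 0))).sum := by
      rw [← ih (l.filter (fun pr => !(pr.1 == k))) hKn
        (fun pr hpr => by
          have h2 := List.mem_filter.mp hpr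
          have h3 := hl pr h2.1
          rcases List.mem_cons.mp h3 with h4 | h4
          · rw [h4] at h2; simp at h2
          · exact h4)]
      apply congrArg
      apply List.map_congr_left
      intro k' hk'
      have hne : k' ≠ k := fun hh => hknot (hh ▸ hk')
      have hfil : List.filter (fun pr => pr.1 == k') (List.filter (fun pr => !(pr.1 == k)) l)
          = List.filter (fun pr => pr.1 == k') l := by
        rw [List.filter_filter]
        apply List.filter_congr
        intro pr _
        by_cases h5 : pr.1 = k' <;> simp [h5, hne]
      rw [hfil]
    rw [hhead, htail]

theorem pvFilterValSum (blob : List Char) (ph : List String) :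
    ((ph.filter (fun p => p ≠ "")).map (fun p => pvVal blob p.toList)).sum
      = (ph.map (gScore blob)).sum := by
  induction ph with
  | nil => rfl
  | cons p t ih =>
    by_cases h : p = ""
    · subst h; simpa [gScore_empty] using ih
    · simpa [h, pvVal_eq_gScore blob p h] using ih

theorem pvPairsSum (blob : List Char) (pti : List (String × List String)) (s : Int) (k : Nat)
    (hk : k < pti.length) :
    ((pvPairs pti s).map (fun pr => if pr.2 = s + k then pvVal blob pr.1 else 0)).sum
      = pvGsum blob pti[k] := by
  induction pti generalizing s k with
  | nil => simp at hk
  | cons x t ih =>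
    rw [pvPairs_cons, List.map_append, List.sum_append]
    cases k with
    | zero =>
      have htail : ((pvPairs t (s + 1)).map (fun pr => if pr.2 = s + (0:Nat) then pvVal blob pr.1 else 0)).sum = 0 := by
        apply List.sum_eq_zero
        intro y hy
        rcases List.mem_map.mp hy with ⟨pr, hpr, rfl⟩
        have := pvPairs_idx_ge t (s + 1) pr hpr
        rw [if_neg (by omega)]
      rw [htail, add_zero]
      have hhead : ((x.2.filter (fun p => p ≠ "")).map (fun p => ((p.toList, s) : List Char × Int))).map
            (fun pr => if pr.2 = s + (0:Nat) then pvVal blob pr.1 else 0)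
          = (x.2.filter (fun p => p ≠ "")).map (fun p => pvVal blob p.toList) := by
        rw [List.map_map]
        exact List.map_congr_left (fun p _ => by simp)
      rw [hhead, pvFilterValSum]
      rfl
    | succ k' =>
      have hhead : (((x.2.filter (fun p => p ≠ "")).map (fun p => ((p.toList, s) : List Char × Int))).map
            (fun pr => if pr.2 = s + ((k' + 1 : Nat) : Int) then pvVal blob pr.1 else 0)).sum = 0 := by
        apply List.sum_eq_zero
        intro y hy
        rcases List.mem_map.mp hy with ⟨pr, hpr, rfl⟩
        rcases List.mem_map.mp hpr with ⟨p, -, rfl⟩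
        rw [if_neg (by push_cast; omega)]
      rw [hhead, zero_add]
      have hk' : k' < t.length := by simpa using hk
      have := ih (s + 1) k' hk'
      have hcast : s + ((k' + 1 : Nat) : Int) = (s + 1) + (k' : Int) := by push_cast; ring
      rw [hcast, this]
      rfl

theorem pvEnumFold (blob : List Char) (l : List (String × List String)) (s : Int)
    (st : Option String × Int) (F : Int → Int)
    (hF : ∀ (k : Nat) (h : k < l.length), F (s + k) = pvGsum blob l[k]) :
    (PySem.List.enumerate l s).foldl (fun (st : Option String × Int) inp =>
        if st.2 < F inp.1 then (some inp.2.1, F inp.1) else st) st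
      = l.foldl (fun (st : Option String × Int) np =>
        if st.2 < pvGsum blob np then (some np.1, pvGsum blob np) else st) st := by
  induction l generalizing s st with
  | nil => rfl
  | cons x t ih =>
    rw [PySem.List.enumerate_cons, List.foldl_cons, List.foldl_cons]
    have h0 : F s = pvGsum blob x := by simpa using hF 0 (by simp)
    rw [h0]
    exact ih (s + 1) _ (fun k hk => by
      have := hF (k + 1) (by simpa using Nat.succ_lt_succ hk)
      simpa [add_assoc, add_comm, add_left_comm] using this)

theorem ports_eq (tp : List String) (pti : List (String × List String)) :
    infer_target_project tp pti = infer_target_project_alt tp pti := by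
  unfold infer_target_project infer_target_project_alt
  simp only []
  by_cases hb : PySem.Chars.lower (PySem.Chars.join [' '] ((tp.filter (fun t => t ≠ "")).map String.toList)) = []
  · rw [if_pos hb, if_pos hb]
  · rw [if_neg hb, if_neg hb]
    set blob := PySem.Chars.lower (PySem.Chars.join [' '] ((tp.filter (fun t => t ≠ "")).map String.toList)) with hblob
    set occ := (PySem.List.enumerate pti 0).foldl (fun d inp =>
        inp.2.2.foldl (fun d p => if p = "" then d else d.modify p.toList [] (· ++ [inp.1])) d) PySem.Dict.empty with hocc
    set scores := occ.items.foldl (fun s pv =>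
        let v : Int := if PySem.Chars.isIn [' '] pv.1 then (if PySem.Chars.isIn pv.1 blob then 2 else 0)
                       else (if PySem.Set.contains (PySem.Set.ofList (PySem.Chars.splitOn blob [' '])) pv.1 then 1 else 0)
        if v ≠ 0 then pv.2.foldl (fun s i => s.modify i 0 (· + v)) s else s) PySem.Dict.empty with hscores
    have hA : (fun (st : Option String × Int) (np : String × List String) =>
        let score := np.2.foldl (fun (sc : Int) phrase =>
          let pl := phrase.toList
          if pl = [] then sc
          else if PySem.Chars.isIn [' '] pl then
            (if PySem.Chars.isIn pl blob then sc + 2 else sc)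
          else
            (if PySem.Chars.isIn (' ' :: pl ++ [' ']) (' ' :: blob ++ [' ']) then sc + 1 else sc)) 0
        if st.2 < score then (some np.1, score) else st)
      = (fun (st : Option String × Int) np => if st.2 < pvGsum blob np then (some np.1, pvGsum blob np) else st) := by
      funext st np
      simp only [score_eq blob np.2]
      rfl
    rw [hA]
    have hsb : (fun (s : PySem.Dict Int Int) (pv : List Char × List Int) =>
        let v : Int := if PySem.Chars.isIn [' '] pv.1 then (if PySem.Chars.isIn pv.1 blob then 2 else 0)
                       else (if PySem.Set.contains (PySem.Set.ofList (PySem.Chars.splitOn blob [' '])) pv.1 then 1 else 0)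
        if v ≠ 0 then pv.2.foldl (fun s i => s.modify i 0 (· + v)) s else s)
      = (fun (s : PySem.Dict Int Int) (pv : List Char × List Int) =>
          if pvVal blob pv.1 ≠ 0 then pv.2.foldl (fun s i => s.modify i 0 (· + pvVal blob pv.1)) s else s) := rfl
    have hoccp : occ = (pvPairs pti 0).foldl (fun d pr => d.modify pr.1 [] (· ++ [pr.2])) PySem.Dict.empty := by
      rw [hocc]; exact pvOccEq pti 0 PySem.Dict.empty
    have hnodup : occ.keys.Nodup := by
      rw [hoccp]
      exact PySem.Dict.nodup_keys_foldl_modify_key (pvPairs pti 0) (fun pr => pr.1) []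
        (fun _ pr => (· ++ [pr.2])) PySem.Dict.empty (by simp)
    have hkeys : occ.keys = PySem.Set.ofList ((pvPairs pti 0).map (fun pr => pr.1)) := by
      rw [hoccp, PySem.Dict.keys_foldl_modify_key (pvPairs pti 0) (fun pr => pr.1) []
        (fun _ pr => (· ++ [pr.2])) PySem.Dict.empty, PySem.Set.ofList_eq_foldl]
      rfl
    have hget : ∀ k, occ.getD k [] = ((pvPairs pti 0).filter (fun pr => pr.1 == k)).map (fun pr => pr.2) := by
      intro k
      rw [hoccp, PySem.Dict.getD_foldl_modify_append]
      simp
    have hscore : ∀ j : Int, scores.getD j 0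
        = ((pvPairs pti 0).map (fun pr => if pr.2 = j then pvVal blob pr.1 else 0)).sum := by
      intro j
      rw [hscores, hsb, pvScoresFold]
      rw [PySem.Dict.items_eq_map_keys occ hnodup [], List.map_map]
      have h1 : ((fun pv : List Char × List Int => pvVal blob pv.1 * pv.2.count j) ∘ (fun k => (k, occ.getD k [])))
          = fun k => pvVal blob k * ((((pvPairs pti 0).filter (fun pr => pr.1 == k)).map (fun pr => pr.2)).count j : Nat) := by
        funext k
        simp [Function.comp, hget k]
      rw [h1, pvGroup blob occ.keys (pvPairs pti 0) j hnodup (fun pr hpr => by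
        rw [hkeys]
        exact (PySem.Set.mem_ofList _ _).mpr (List.mem_map.mpr ⟨pr, hpr, rfl⟩))]
      simp
    have hfin : (PySem.List.enumerate pti 0).foldl (fun (st : Option String × Int) inp =>
        let s := scores.getD inp.1 0
        if st.2 < s then (some inp.2.1, s) else st) (none, 0)
      = pti.foldl (fun (st : Option String × Int) np =>
          if st.2 < pvGsum blob np then (some np.1, pvGsum blob np) else st) (none, 0) :=
      pvEnumFold blob pti 0 (none, 0) (fun i => scores.getD i 0) (fun k hk => by
        show scores.getD (0 + (k : Int)) 0 = pvGsum blob pti[k]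
        rw [hscore, pvPairsSum blob pti 0 k hk])
    rw [hfin]

-- ===== VERDICT (by name: the statement is the Claim_ definition above) =====
theorem infer_target_project_spec : Claim_equal_infer_target_project := by
  intro text_parts project_topic_index _
  exact ports_eq text_parts project_topic_index
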